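-- pv_equiv track=rewrite | github.com/visha176/Flask-Render | app/routes.py | parse_wg_show_output
-- ===== SOURCE A (Python) =====
-- def parse_wg_show_output(output):
--     connections = []
--     current_peer = None
--     for line in output.splitlines():
--         if line.startswith("peer:"):
--             if current_peer:
--                 connections.append(current_peer)
--             current_peer = {"peer": line.split()[1]}
--         elif line.startswith("endpoint:") and current_peer:
--             current_peer["endpoint"] = line.split()[1]
--         elif line.startswith("allowed ips:") and current_peer:
--             current_peer["allowed_ips"] = line.split()[2]
--     if current_peer:
--         connections.append(current_peer)
--     return connections
-- ===== SOURCE B (Python) =====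
-- def parse_wg_show_output(output):
--     # Block parser: outer loop finds each "peer:" header, inner loop consumes
--     # that peer's block of lines; no Optional "current peer" state needed.
--     it = iter(output.splitlines())
--     line = next(it, None)
--     connections = []
--     while line is not None:
--         if not line.startswith("peer:"):
--             line = next(it, None)
--             continue
--         peer = {"peer": line.split()[1]}
--         line = next(it, None)
--         while line is not None and not line.startswith("peer:"):
--             if line.startswith("endpoint:"):
--                 peer["endpoint"] = line.split()[1]
--             elif line.startswith("allowed ips:"):
--                 peer["allowed_ips"] = line.split()[2]
--             line = next(it, None)
--         connections.append(peer)
--     return connections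
-- ===== Notes on version B (the rewrite author's own statement) =====
-- stated objective: alternative
-- what changed: B replaces A's one-pass state machine carrying an Optional current-peer dict (with 'and current_peer' guards on every branch) by a nested-loop block parser over an iterator of lines: the outer loop finds each 'peer:' header, an inner loop consumes that peer's block of lines, so no Optional state or trailing flush is needed.
import Mathlib
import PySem

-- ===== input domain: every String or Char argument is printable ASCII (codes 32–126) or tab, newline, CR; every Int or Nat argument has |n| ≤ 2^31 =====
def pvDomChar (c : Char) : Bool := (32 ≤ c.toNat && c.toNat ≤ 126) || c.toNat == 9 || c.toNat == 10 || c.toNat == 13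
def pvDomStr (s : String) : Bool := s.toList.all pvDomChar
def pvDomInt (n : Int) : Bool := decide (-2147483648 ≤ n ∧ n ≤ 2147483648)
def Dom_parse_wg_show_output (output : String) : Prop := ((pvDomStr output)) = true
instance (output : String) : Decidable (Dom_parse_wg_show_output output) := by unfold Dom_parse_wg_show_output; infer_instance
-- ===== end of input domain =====

-- B replaces A's one-pass state machine (Optional current dict) by a nested-loop block
-- parser (outer loop per "peer:" header, inner loop consuming that peer's block);
-- objective: alternative decomposition, same cost.

-- shared transliteration of `line.split()[i]`: Pre_ excludes the inputs where Python raises IndexError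
def pwgTok (line : String) (i : Int) : String :=
  (PySem.List.pyGet? (PySem.Str.split₀ line) i).getD ""

-- ===== PORT A =====
-- A's loop body: state = (connections, current_peer : Option dict)
def pwgStep (st : List (List (String × String)) × Option (PySem.Dict String String))
    (line : String) : List (List (String × String)) × Option (PySem.Dict String String) :=
  if PySem.Str.startswith line "peer:" then
    ((match st.2 with | some d => st.1 ++ [d.items] | none => st.1),
     some (PySem.Dict.empty.insert "peer" (pwgTok line 1)))
  else if PySem.Str.startswith line "endpoint:" then
    match st.2 with
    | some d => (st.1, some (d.insert "endpoint" (pwgTok line 1)))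
    | none => st
  else if PySem.Str.startswith line "allowed ips:" then
    match st.2 with
    | some d => (st.1, some (d.insert "allowed_ips" (pwgTok line 2)))
    | none => st
  else st

def parse_wg_show_output (output : String) : List (List (String × String)) :=
  let st := (PySem.Str.splitlines output).foldl pwgStep ([], none)
  match st.2 with
  | some d => st.1 ++ [d.items]
  | none => st.1

-- ===== PORT B =====
-- B's inner while-loop: consume lines of the current peer's block, updating its dict,
-- until the iterator is exhausted or the next "peer:" header is the current line.
def pwgInner (d : PySem.Dict String String) : List String → PySem.Dict String String × List String
  | [] => (d, [])
  | line :: rest =>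
    if PySem.Str.startswith line "peer:" then (d, line :: rest)
    else if PySem.Str.startswith line "endpoint:" then
      pwgInner (d.insert "endpoint" (pwgTok line 1)) rest
    else if PySem.Str.startswith line "allowed ips:" then
      pwgInner (d.insert "allowed_ips" (pwgTok line 2)) rest
    else pwgInner d rest

-- for termination of the outer loop: the inner loop returns a suffix of its input
theorem pwgInner_length_le (d : PySem.Dict String String) (l : List String) :
    (pwgInner d l).2.length ≤ l.length := by
  induction l generalizing d with
  | nil => simp [pwgInner]
  | cons line rest ih =>
    simp only [pwgInner]
    split_ifs <;> simp <;> exact le_trans (ih _) (Nat.le_succ _)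

-- B's outer while-loop
def pwgOuter : List String → List (List (String × String))
  | [] => []
  | line :: rest =>
    if PySem.Str.startswith line "peer:" then
      let r := pwgInner (PySem.Dict.empty.insert "peer" (pwgTok line 1)) rest
      r.1.items :: pwgOuter r.2
    else pwgOuter rest
termination_by lines => lines.length
decreasing_by
  · exact Nat.lt_succ_of_le (pwgInner_length_le _ _)
  · simp

def parse_wg_show_output_alt (output : String) : List (List (String × String)) :=
  pwgOuter (PySem.Str.splitlines output)

-- ===== PRECONDITION & SPEC =====
-- Pre_ = exactly the inputs where Python A returns (no IndexError): every "peer:" line has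
-- ≥ 2 whitespace tokens, and — at or after the first "peer:" line, where current_peer is set —
-- every "endpoint:" line has ≥ 2 tokens and every "allowed ips:" line has ≥ 3.
def Pre_parse_wg_show_output (output : String) : Prop :=
  (∀ line ∈ PySem.Str.splitlines output,
      PySem.Str.startswith line "peer:" = true → 2 ≤ (PySem.Str.split₀ line).length) ∧
  (∀ line ∈ (PySem.Str.splitlines output).dropWhile
      (fun l => !(PySem.Str.startswith l "peer:")),
      (PySem.Str.startswith line "endpoint:" = true → 2 ≤ (PySem.Str.split₀ line).length) ∧
      (PySem.Str.startswith line "allowed ips:" = true → 3 ≤ (PySem.Str.split₀ line).length))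
instance (output : String) : Decidable (Pre_parse_wg_show_output output) := by
  unfold Pre_parse_wg_show_output; infer_instance

def pvWitness_parse_wg_show_output : String :=
  "interface: wg0\npeer: abc\n  endpoint: 1.2.3.4:51820\n  allowed ips: 10.0.0.2/32\npeer: xyz\n  allowed ips: 10.0.0.3/32"

def Spec_parse_wg_show_output (output : String) (out : List (List (String × String))) : Prop := out = parse_wg_show_output_alt output
instance (output : String) (out : List (List (String × String))) : Decidable (Spec_parse_wg_show_output output out) := by unfold Spec_parse_wg_show_output; infer_instance

-- ===== CLAIM (what is proved, stated in full; the proofs are below) =====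
def Claim_equal_parse_wg_show_output : Prop := ∀ (output : String), Dom_parse_wg_show_output output → Pre_parse_wg_show_output output → Spec_parse_wg_show_output output (parse_wg_show_output output)

-- ===== LEMMAS AND PROOFS =====

-- finalization of A's loop state (the trailing `if current_peer: connections.append(...)`)
def pwgFin (st : List (List (String × String)) × Option (PySem.Dict String String)) :
    List (List (String × String)) :=
  match st.2 with
  | some d => st.1 ++ [d.items]
  | none => st.1

-- A's loop, started with a current peer, produces that peer's finished block followed by
-- the blocks of the remaining lines — exactly B's inner/outer loop pair.
theorem pwgFoldl_some (lines : List String) :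
    ∀ (cs : List (List (String × String))) (d : PySem.Dict String String),
      pwgFin (lines.foldl pwgStep (cs, some d)) =
        cs ++ (pwgInner d lines).1.items :: pwgOuter (pwgInner d lines).2 := by
  induction lines with
  | nil => intro cs d; simp [pwgInner, pwgOuter, pwgFin]
  | cons line rest ih =>
    intro cs d
    rw [List.foldl_cons]
    simp only [pwgStep, pwgInner]
    split_ifs with hp he ha
    · rw [ih]
      simp only [pwgOuter, if_pos hp]
      simp
    · rw [ih]
    · rw [ih]
    · rw [ih]

-- A's loop with no current peer skips lines up to the first header and then agrees with B.
theorem pwgFoldl_none (lines : List String) :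
    ∀ (cs : List (List (String × String))),
      pwgFin (lines.foldl pwgStep (cs, none)) = cs ++ pwgOuter lines := by
  induction lines with
  | nil => intro cs; simp [pwgOuter, pwgFin]
  | cons line rest ih =>
    intro cs
    rw [List.foldl_cons]
    simp only [pwgStep]
    split_ifs with hp he ha
    · rw [pwgFoldl_some]
      simp only [pwgOuter, if_pos hp]
    · rw [ih]
      simp only [pwgOuter, if_neg hp]
    · rw [ih]
      simp only [pwgOuter, if_neg hp]
    · rw [ih]
      simp only [pwgOuter, if_neg hp]

-- ===== VERDICT (by name: the statement is the Claim_ definition above) =====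
theorem parse_wg_show_output_spec : Claim_equal_parse_wg_show_output := by
  intro output _ _
  show parse_wg_show_output output = parse_wg_show_output_alt output
  have h : parse_wg_show_output output =
      pwgFin ((PySem.Str.splitlines output).foldl pwgStep ([], none)) := rfl
  rw [h, pwgFoldl_none]
  rfl
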